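-- pv_equiv track=rewrite | github.com/RobbeW/Data_Statistiek_R | Deel 3 Algoritmiek/01 Lijsten en tuples/10 Slaapplaatsen/solution/solution.nl.py | slaapplaats
-- ===== SOURCE A (Python) =====
-- def slaapplaats(plekken):
--     j = 0
--     while plekken[j] != "X":
--         j += 1
--     count = j
--     maxi = 2 * count - 1
--     for i in range(j, len(plekken)):
--         char = plekken[i]
--         if char == "X":
--             if count > maxi:
--                 maxi = count
--             count = 0
--         elif i == len(plekken) - 1:
--             count = 2*count + 1
--             if count > maxi:
--                 maxi = count
--         else:
--             count += 1
--
--     getal = (maxi - 1) // 2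
--     return getal
-- ===== SOURCE B (Python) =====
-- def slaapplaats(plekken):
--     xs = [i for i, c in enumerate(plekken) if c == "X"]
--     best = max(xs[0] - 1, len(plekken) - xs[-1] - 2)
--     for a, b in zip(xs, xs[1:]):
--         cand = (b - a - 2) // 2
--         if cand > best:
--             best = cand
--     return best
-- ===== Notes on version B (the rewrite author's own statement) =====
-- stated objective: simpler
-- what changed: Replaces A's sentinel-initialised single-pass counter automaton (find first X by a while loop, then a stateful run-length scan with a doubled-count trick for lead/trail, decoded at the end by (maxi-1)//2) with a direct decomposition: collect the X positions once, then take the max of lead-1, trail-1 and (gap-1)//2 over consecutive X pairs.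
import Mathlib
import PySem

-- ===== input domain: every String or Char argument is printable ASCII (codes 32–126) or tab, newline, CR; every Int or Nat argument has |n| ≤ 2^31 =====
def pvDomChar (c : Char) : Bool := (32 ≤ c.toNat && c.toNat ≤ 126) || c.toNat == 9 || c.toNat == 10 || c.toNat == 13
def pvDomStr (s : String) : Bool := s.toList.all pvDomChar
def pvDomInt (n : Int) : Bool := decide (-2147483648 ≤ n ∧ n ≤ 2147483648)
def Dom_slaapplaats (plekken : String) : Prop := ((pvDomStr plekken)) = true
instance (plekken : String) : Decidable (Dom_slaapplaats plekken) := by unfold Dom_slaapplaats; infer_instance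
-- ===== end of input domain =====

-- B replaces A's stateful counter automaton by a decomposition over the X positions
-- (lead-1, trail-1 and (gap-1)//2 per consecutive X pair); objective: simpler, same O(n) cost.


-- ===== PORT A =====
-- 'while plekken[j] != "X": j += 1'; the out-of-range fallthrough is Python's IndexError,
-- excluded by Pre_slaapplaats.
def pvFindX (cs : List Char) (j : Nat) : Nat :=
  if h : j < cs.length then
    if cs[j] = 'X' then j else pvFindX cs (j + 1)
  else j
termination_by cs.length - j

-- 'for i in range(j, len(plekken)): …' with state (count, maxi), returning the final maxi.
def pvLoopA (cs : List Char) (i : Nat) (count maxi : Int) : Int :=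
  if h : i < cs.length then
    let chr := cs[i]
    if chr = 'X' then
      pvLoopA cs (i + 1) 0 (if count > maxi then count else maxi)
    else if i = cs.length - 1 then
      pvLoopA cs (i + 1) (2 * count + 1) (if 2 * count + 1 > maxi then 2 * count + 1 else maxi)
    else
      pvLoopA cs (i + 1) (count + 1) maxi
  else maxi
termination_by cs.length - i

def slaapplaats (plekken : String) : Int :=
  let cs := plekken.toList
  let j := pvFindX cs 0
  let count : Int := (j : Int)
  let maxi : Int := 2 * count - 1
  PySem.Int.floordiv (pvLoopA cs j count maxi - 1) 2

-- ===== PORT B =====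
def slaapplaats_alt (plekken : String) : Int :=
  let cs := plekken.toList
  let xs : List Int := ((PySem.List.enumerate cs 0).filter (fun p => p.2 == 'X')).map (·.1)
  let best : Int := max (PySem.List.pyGetD xs 0 0 - 1)
                        (PySem.Str.len plekken - PySem.List.pyGetD xs (-1) 0 - 2)
  (xs.zip (PySem.List.slice xs (some 1) none)).foldl
    (fun best p =>
      let cand := PySem.Int.floordiv (p.2 - p.1 - 2) 2
      if cand > best then cand else best) best

-- ===== PRECONDITION & SPEC =====
-- Pre_ excludes exactly the inputs without any 'X', on which A's while loop runs off the
-- end and raises IndexError (B raises there too, at xs[0]).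
def Pre_slaapplaats (plekken : String) : Prop := 'X' ∈ plekken.toList
instance (plekken : String) : Decidable (Pre_slaapplaats plekken) := by
  unfold Pre_slaapplaats; infer_instance

def pvWitness_slaapplaats : String := ".X.."

def Spec_slaapplaats (plekken : String) (out : Int) : Prop := out = slaapplaats_alt plekken
instance (plekken : String) (out : Int) : Decidable (Spec_slaapplaats plekken out) := by
  unfold Spec_slaapplaats; infer_instance

-- ===== CLAIM (what is proved, stated in full; the proofs are below) =====
def Claim_equal_slaapplaats : Prop := ∀ (plekken : String), Dom_slaapplaats plekken → Pre_slaapplaats plekken → Spec_slaapplaats plekken (slaapplaats plekken)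

-- ===== LEMMAS AND PROOFS =====

-- (x-1)//2, the decoder both sides end in
def pvHalf (x : Int) : Int := PySem.Int.floordiv (x - 1) 2

-- index of the first 'X' in a list
def pvFindAux : List Char → Nat
  | [] => 0
  | c :: t => if c = 'X' then 0 else pvFindAux t + 1

-- A's loop as a function of the remaining suffix and the current run count
def pvG : List Char → Int → Int
  | [], _ => -1
  | [c], count => if c = 'X' then count else 2 * count + 1
  | c :: d :: t, count =>
      if c = 'X' then max count (pvG (d :: t) 0) else pvG (d :: t) (count + 1)

-- run decomposition: gaps recorded at each 'X' (starting from count c) and the trailing run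
def pvRuns : List Char → Int → List Int × Int
  | [], c => ([], c)
  | x :: t, c =>
      if x = 'X' then
        let r := pvRuns t 0
        (c :: r.1, r.2)
      else pvRuns t (c + 1)

-- X positions reconstructed from the gap list
def pvPosOf : Int → List Int → List Int
  | _, [] => []
  | s, g :: gs => (s + g) :: pvPosOf (s + g + 1) gs

-- B's position list
def pvXs (l : List Char) (s : Int) : List Int :=
  ((PySem.List.enumerate l s).filter (fun p => p.2 == 'X')).map (·.1)

theorem pvRuns_nil (c : Int) : pvRuns [] c = ([], c) := rfl
theorem pvRuns_cons (x : Char) (t : List Char) (c : Int) :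
    pvRuns (x :: t) c = if x = 'X' then (c :: (pvRuns t 0).1, (pvRuns t 0).2)
                        else pvRuns t (c + 1) := by
  by_cases hx : x = 'X' <;> simp [pvRuns, hx]

theorem pvG_one (c : Char) (count : Int) :
    pvG [c] count = if c = 'X' then count else 2 * count + 1 := rfl
theorem pvG_cons2 (c d : Char) (t : List Char) (count : Int) :
    pvG (c :: d :: t) count = if c = 'X' then max count (pvG (d :: t) 0)
                              else pvG (d :: t) (count + 1) := rfl

theorem pvPosOf_cons (s g : Int) (gs : List Int) :
    pvPosOf s (g :: gs) = (s + g) :: pvPosOf (s + g + 1) gs := rfl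

theorem pvFindAux_append (pre rest : List Char) (h : ∀ c ∈ pre, c ≠ 'X') :
    pvFindAux (pre ++ 'X' :: rest) = pre.length := by
  induction pre with
  | nil => simp [pvFindAux]
  | cons c t ih =>
      have hc : c ≠ 'X' := h c (by simp)
      simp [pvFindAux, hc, ih (fun a ha => h a (by simp [ha]))]

theorem pvFindX_drop (l : List Char) : ∀ (cs : List Char) (j : Nat), cs.drop j = l →
    pvFindX cs j = j + pvFindAux l := by
  induction l with
  | nil =>
      intro cs j hd
      have hlen : cs.length ≤ j := by
        by_contra hlt
        have := List.drop_eq_nil_iff.mp hd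
        omega
      unfold pvFindX
      simp [pvFindAux]
      omega
  | cons c t ih =>
      intro cs j hd
      have hj : j < cs.length := by
        by_contra hge
        rw [List.drop_eq_nil_of_le (by omega)] at hd
        simp at hd
      have hget : cs[j] = c := by
        have : (cs.drop j)[0]'(by simp [hd]) = c := by simp [hd]
        simpa [List.getElem_drop] using this
      have hdt : cs.drop (j + 1) = t := by
        have : (cs.drop j).drop 1 = t := by simp [hd]
        simpa [List.drop_drop] using this
      unfold pvFindX
      by_cases hc : c = 'X'
      · simp [hj, hget, hc, pvFindAux]
      · simp [hj, hget, hc, pvFindAux, ih cs (j + 1) hdt]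
        omega

theorem pvDecomp (cs : List Char) (h : 'X' ∈ cs) :
    ∃ pre rest, cs = pre ++ 'X' :: rest ∧ ∀ c ∈ pre, c ≠ 'X' := by
  induction cs with
  | nil => cases h
  | cons c t ih =>
      by_cases hc : c = 'X'
      · exact ⟨[], t, by simp [hc], by simp⟩
      · have ht : 'X' ∈ t := by
          rcases List.mem_cons.mp h with h1 | h1
          · exact absurd h1.symm hc
          · exact h1
        obtain ⟨pre, rest, heq, hpre⟩ := ih ht
        exact ⟨c :: pre, rest, by simp [heq], by
          intro a ha
          rcases List.mem_cons.mp ha with h1 | h1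
          · simpa [h1] using hc
          · exact hpre a h1⟩

theorem pvIteMax (a b : Int) : (if a > b then a else b) = max b a := by
  split_ifs with h <;> omega

theorem pvLoopA_eq (l : List Char) : ∀ (cs : List Char) (i : Nat) (count maxi : Int),
    cs.drop i = l → -1 ≤ maxi → pvLoopA cs i count maxi = max maxi (pvG l count) := by
  induction l with
  | nil =>
      intro cs i count maxi hd hm
      have hlen : cs.length ≤ i := by
        by_contra hlt
        have := List.drop_eq_nil_iff.mp hd
        omega
      unfold pvLoopA
      rw [dif_neg (by omega)]
      show maxi = max maxi (-1)
      omega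
  | cons c t ih =>
      intro cs i count maxi hd hm
      have hi : i < cs.length := by
        by_contra hge
        rw [List.drop_eq_nil_of_le (by omega)] at hd
        simp at hd
      have hget : cs[i] = c := by
        have : (cs.drop i)[0]'(by simp [hd]) = c := by simp [hd]
        simpa [List.getElem_drop] using this
      have hdt : cs.drop (i + 1) = t := by
        have : (cs.drop i).drop 1 = t := by simp [hd]
        simpa [List.drop_drop] using this
      have hlt : cs.length - i = t.length + 1 := by
        have := congrArg List.length hd
        simp [List.length_drop] at this
        omega
      unfold pvLoopA
      rw [dif_pos hi]
      simp only [hget]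
      by_cases hc : c = 'X'
      · rw [if_pos hc]
        cases t with
        | nil =>
            have hend : cs.length = i + 1 := by
              simp at hlt
              omega
            unfold pvLoopA
            rw [dif_neg (by omega)]
            rw [pvIteMax, pvG_one, if_pos hc]
        | cons d t' =>
            rw [ih cs (i + 1) 0 _ hdt (by rw [pvIteMax]; omega), pvIteMax]
            rw [pvG_cons2, if_pos hc]
            omega
      · rw [if_neg hc]
        cases t with
        | nil =>
            have hend : cs.length = i + 1 := by
              simp at hlt
              omega
            rw [if_pos (by omega)]
            unfold pvLoopA
            rw [dif_neg (by omega)]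
            rw [pvIteMax, pvG_one, if_neg hc]
        | cons d t' =>
            have hne : i ≠ cs.length - 1 := by
              simp at hlt
              omega
            rw [if_neg hne]
            rw [ih cs (i + 1) (count + 1) maxi hdt hm]
            rw [pvG_cons2, if_neg hc]

theorem pvG_runs (l : List Char) : ∀ (c : Int), l ≠ [] → 0 ≤ c →
    pvG l c = (pvRuns l c).1.foldr max (2 * (pvRuns l c).2 - 1) := by
  induction l with
  | nil => intro c h _; exact absurd rfl h
  | cons x t ih =>
      intro c _ hc
      cases t with
      | nil =>
          rw [pvG_one, pvRuns_cons]
          by_cases hx : x = 'X'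
          · rw [if_pos hx, if_pos hx, pvRuns_nil]
            show c = max c (2 * 0 - 1)
            omega
          · rw [if_neg hx, if_neg hx, pvRuns_nil]
            show 2 * c + 1 = 2 * (c + 1) - 1
            ring
      | cons d t' =>
          rw [pvG_cons2, pvRuns_cons]
          by_cases hx : x = 'X'
          · rw [if_pos hx, if_pos hx, ih 0 (by simp) le_rfl]
            rw [List.foldr_cons]
          · rw [if_neg hx, if_neg hx]
            exact ih (c + 1) (by simp) (by omega)

theorem pvRuns_sum (l : List Char) : ∀ (c : Int),
    (pvRuns l c).1.sum + (pvRuns l c).1.length + (pvRuns l c).2 = c + l.length := by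
  induction l with
  | nil => intro c; rw [pvRuns_nil]; simp
  | cons x t ih =>
      intro c
      rw [pvRuns_cons]
      by_cases hx : x = 'X'
      · have := ih 0
        rw [if_pos hx]
        simp only [List.sum_cons, List.length_cons, List.length_cons]
        push_cast
        push_cast at this
        omega
      · have := ih (c + 1)
        rw [if_neg hx]
        simp only [List.length_cons]
        push_cast
        push_cast at this
        omega

theorem pvRuns_prefix (pre : List Char) : ∀ (l : List Char) (c : Int), (∀ a ∈ pre, a ≠ 'X') →
    pvRuns (pre ++ l) c = pvRuns l (c + pre.length) := by
  induction pre with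
  | nil => intro l c _; simp
  | cons x t ih =>
      intro l c h
      have hx : x ≠ 'X' := h x (by simp)
      rw [List.cons_append, pvRuns_cons, if_neg hx]
      rw [ih l (c + 1) (fun a ha => h a (by simp [ha]))]
      congr 1
      simp only [List.length_cons]
      push_cast
      ring

theorem pvXs_nil (s : Int) : pvXs [] s = [] := by simp [pvXs, PySem.List.enumerate_nil]

theorem pvXs_cons (c : Char) (t : List Char) (s : Int) :
    pvXs (c :: t) s = if c = 'X' then s :: pvXs t (s + 1) else pvXs t (s + 1) := by
  by_cases hc : c = 'X' <;> simp [pvXs, PySem.List.enumerate_cons, hc]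

theorem pvLinkPos (l : List Char) : ∀ (s c : Int),
    pvXs l s = pvPosOf (s - c) (pvRuns l c).1 := by
  induction l with
  | nil => intro s c; rw [pvXs_nil, pvRuns_nil]; rfl
  | cons x t ih =>
      intro s c
      rw [pvXs_cons, pvRuns_cons]
      by_cases hx : x = 'X'
      · rw [if_pos hx, if_pos hx, pvPosOf_cons, ih (s + 1) 0]
        have h1 : s - c + c = s := by ring
        rw [h1]
        norm_num
      · rw [if_neg hx, if_neg hx, ih (s + 1) (c + 1)]
        congr 1
        omega

theorem pvPosOf_getLast? (gs : List Int) : ∀ (g : Int) (s : Int),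
    (pvPosOf s (g :: gs)).getLast? = some (s + (g :: gs).sum + gs.length) := by
  induction gs with
  | nil => intro g s; rw [pvPosOf_cons]; simp [pvPosOf]
  | cons g2 gs' ih =>
      intro g s
      rw [pvPosOf_cons, pvPosOf_cons, List.getLast?_cons_cons, ← pvPosOf_cons,
          ih g2 (s + g + 1)]
      congr 1
      simp only [List.sum_cons, List.length_cons]
      push_cast
      ring

theorem pvZipMap (gs : List Int) : ∀ (g s : Int),
    (((pvPosOf s (g :: gs)).zip (pvPosOf s (g :: gs)).tail).map
      (fun p => PySem.Int.floordiv (p.2 - p.1 - 2) 2)) = gs.map pvHalf := by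
  induction gs with
  | nil => intro g s; rw [pvPosOf_cons]; simp [pvPosOf]
  | cons g2 gs' ih =>
      intro g s
      rw [pvPosOf_cons, pvPosOf_cons, List.tail_cons, List.zip_cons_cons, List.map_cons]
      rw [show ((s + g + 1 + g2) - (s + g) - 2 : Int) = g2 - 1 by ring]
      have h2 := ih g2 (s + g + 1)
      rw [pvPosOf_cons, List.tail_cons] at h2
      rw [List.map_cons, show pvHalf g2 = PySem.Int.floordiv (g2 - 1) 2 from rfl, h2]

theorem pvFoldrMaxPull (l : List Int) : ∀ (a b : Int),
    l.foldr max (max a b) = max a (l.foldr max b) := by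
  induction l with
  | nil => intro a b; rfl
  | cons c t ih =>
      intro a b
      simp only [List.foldr_cons, ih]
      omega

theorem pvFoldlMaxEq (l : List Int) : ∀ (init : Int),
    l.foldl (fun b x => max b x) init = l.foldr max init := by
  induction l with
  | nil => intro init; rfl
  | cons c t ih =>
      intro init
      simp only [List.foldl_cons, List.foldr_cons, ih]
      rw [← pvFoldrMaxPull]
      congr 1
      omega

theorem pvHalf_max (a b : Int) : pvHalf (max a b) = max (pvHalf a) (pvHalf b) := by
  unfold pvHalf
  rw [PySem.Int.floordiv_eq_ediv_of_pos (by norm_num),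
      PySem.Int.floordiv_eq_ediv_of_pos (by norm_num),
      PySem.Int.floordiv_eq_ediv_of_pos (by norm_num)]
  omega

theorem pvHalf_foldr (l : List Int) (b : Int) :
    pvHalf (l.foldr max b) = (l.map pvHalf).foldr max (pvHalf b) := by
  induction l with
  | nil => rfl
  | cons c t ih => simp only [List.foldr_cons, List.map_cons, pvHalf_max, ih]

theorem pvHalf_two (J : Int) : pvHalf (2 * J - 1) = J - 1 := by
  unfold pvHalf
  rw [PySem.Int.floordiv_eq_ediv_of_pos (by norm_num)]
  omega

theorem pvHalf_le (J : Int) (h : 0 ≤ J) : pvHalf J ≤ J - 1 := by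
  unfold pvHalf
  rw [PySem.Int.floordiv_eq_ediv_of_pos (by norm_num)]
  omega

-- ===== VERDICT (by name: the statement is the Claim_ definition above) =====
theorem slaapplaats_spec : Claim_equal_slaapplaats := by
  intro plekken _ hpre
  unfold Spec_slaapplaats
  obtain ⟨pre, rest, hcs, hpreX⟩ := pvDecomp plekken.toList hpre
  set cs := plekken.toList with hcsdef
  set J : Int := (pre.length : Int) with hJ
  have hJ0 : 0 ≤ J := by positivity
  set gs : List Int := (pvRuns rest 0).1 with hgs
  set tr : Int := (pvRuns rest 0).2 with htr
  have hruns : pvRuns cs 0 = (J :: gs, tr) := by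
    rw [hcs, pvRuns_prefix pre _ 0 hpreX, pvRuns_cons, if_pos rfl, hgs, htr, hJ]
    norm_num
  have hsum : gs.sum + gs.length + tr = rest.length := by
    have := pvRuns_sum rest 0
    rw [← hgs, ← htr] at this
    omega
  have hlen : (cs.length : Int) = J + 1 + rest.length := by
    rw [hcs]; simp [hJ]; ring
  -- A side
  have hfind : pvFindX cs 0 = pre.length := by
    rw [pvFindX_drop cs cs 0 (by simp), hcs, pvFindAux_append pre rest hpreX]
    omega
  have hdrop : cs.drop pre.length = 'X' :: rest := by
    rw [hcs]; simp
  have hA : slaapplaats plekken = pvHalf (max (2 * J - 1) (pvG ('X' :: rest) J)) := by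
    show PySem.Int.floordiv (pvLoopA cs (pvFindX cs 0) _ _ - 1) 2 = _
    rw [hfind, pvLoopA_eq ('X' :: rest) cs pre.length J (2 * J - 1) hdrop (by omega)]
    rfl
  have hrunsX : pvRuns ('X' :: rest) J = (J :: gs, tr) := by
    rw [pvRuns_cons, if_pos rfl, hgs, htr]
  rw [hA, pvG_runs ('X' :: rest) J (by simp) hJ0, hrunsX]
  -- B side
  have hxs : pvXs cs 0 = J :: pvPosOf (J + 1) gs := by
    rw [pvLinkPos cs 0 0, hruns]
    simp [pvPosOf]
  have hB : slaapplaats_alt plekken =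
      ((pvXs cs 0).zip (pvXs cs 0).tail).foldl
        (fun best p =>
          let cand := PySem.Int.floordiv (p.2 - p.1 - 2) 2
          if cand > best then cand else best)
        (max (PySem.List.pyGetD (pvXs cs 0) 0 0 - 1)
             (PySem.Str.len plekken - PySem.List.pyGetD (pvXs cs 0) (-1) 0 - 2)) := by
    simp only [slaapplaats_alt, pvXs, PySem.List.slice_from_one]
    rfl
  rw [hB, hxs]
  -- head and last of the position list
  have hhead : PySem.List.pyGetD (J :: pvPosOf (J + 1) gs) 0 0 = J :=
    PySem.List.pyGetD_zero_cons _ _ _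
  have hlast : PySem.List.pyGetD (J :: pvPosOf (J + 1) gs) (-1) 0 = J + gs.sum + gs.length := by
    have hne : (J :: pvPosOf (J + 1) gs : List Int) ≠ [] := by simp
    rw [PySem.List.pyGetD_neg_one _ _ hne]
    have h1 : (pvPosOf 0 (J :: gs)).getLast? = some (0 + (J :: gs).sum + gs.length) :=
      pvPosOf_getLast? gs J 0
    have h2 : pvPosOf 0 (J :: gs) = J :: pvPosOf (J + 1) gs := by
      simp [pvPosOf]
    rw [h2] at h1
    rw [List.getLast?_eq_some_getLast hne] at h1
    have h3 := Option.some.inj h1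
    rw [h3]
    simp [List.sum_cons]
  rw [hhead, hlast]
  have hlenstr : PySem.Str.len plekken = (cs.length : Int) := by
    simp [PySem.Str.len_eq, hcsdef]
  rw [hlenstr, hlen]
  -- the trailing candidate
  have htrail : (J + 1 + (rest.length : Int) - (J + gs.sum + gs.length) - 2) = tr - 1 := by
    omega
  rw [htrail]
  -- turn B's fold into a foldr max over the interior candidates
  have hfold :
      ((J :: pvPosOf (J + 1) gs).zip (J :: pvPosOf (J + 1) gs).tail).foldl
        (fun best p =>
          let cand := PySem.Int.floordiv (p.2 - p.1 - 2) 2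
          if cand > best then cand else best) (max (J - 1) (tr - 1))
      = (gs.map pvHalf).foldr max (max (J - 1) (tr - 1)) := by
    have hz : ((J :: pvPosOf (J + 1) gs).zip (J :: pvPosOf (J + 1) gs).tail)
        = ((pvPosOf 0 (J :: gs)).zip (pvPosOf 0 (J :: gs)).tail) := by
      simp [pvPosOf]
    have hfun : (fun (best : Int) (p : Int × Int) =>
        let cand := PySem.Int.floordiv (p.2 - p.1 - 2) 2
        if cand > best then cand else best)
        = fun (best : Int) (p : Int × Int) =>
            max best (PySem.Int.floordiv (p.2 - p.1 - 2) 2) := by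
      funext b p
      exact pvIteMax _ _
    rw [hz]
    rw [hfun]
    rw [show List.foldl (fun (best : Int) (p : Int × Int) =>
            max best (PySem.Int.floordiv (p.2 - p.1 - 2) 2)) (max (J - 1) (tr - 1))
            ((pvPosOf 0 (J :: gs)).zip (pvPosOf 0 (J :: gs)).tail)
        = List.foldl (fun (b x : Int) => max b x) (max (J - 1) (tr - 1))
            (((pvPosOf 0 (J :: gs)).zip (pvPosOf 0 (J :: gs)).tail).map
              (fun (p : Int × Int) => PySem.Int.floordiv (p.2 - p.1 - 2) 2))
        from List.foldl_map.symm]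
    rw [pvZipMap gs J 0]
    rw [pvFoldlMaxEq]
  rw [hfold]
  -- final arithmetic: decode A's encoded maximum
  show pvHalf (max (2 * J - 1) ((J :: gs).foldr max (2 * tr - 1))) = _
  rw [List.foldr_cons, pvHalf_max, pvHalf_max, pvHalf_foldr, pvHalf_two, pvHalf_two]
  rw [pvFoldrMaxPull]
  have habs : max (J - 1) (max (pvHalf J) ((gs.map pvHalf).foldr max (tr - 1)))
      = max (J - 1) ((gs.map pvHalf).foldr max (tr - 1)) := by
    have := pvHalf_le J hJ0
    omega
  rw [habs]
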